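-- pv_equiv track=rewrite | github.com/ethankeystone/twitterSentimentAnalysis | PreProcess.py | removeRandomBitCode
-- ===== SOURCE A (Python) =====
-- def removeRandomBitCode(retweet):
--     tweet = str(retweet)
--     for i in range(len(tweet)):
--         if(i >= len(tweet)):
--             break
--         if(tweet[i] == '\\'):
--             bottom = i
--             top = 0
--
--             if(tweet[i:i+2] != '\\n'):
--                 for j in range(i,len(tweet)):
--                     if(tweet[j] == ' '):
--                         top = j
--                         break
--                 if(top == 0):
--                     top = len(tweet)
--
--                 tweet = tweet[0:bottom] + tweet[top:len(tweet)]
--     return(tweet)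
-- ===== SOURCE B (Python) =====
-- def removeRandomBitCode(retweet):
--     def cut(t):
--         for k, c in enumerate(t):
--             if c == '\\' and t[k + 1:k + 2] != 'n':
--                 return t[:k]
--         return t
--     return ' '.join(cut(token) for token in str(retweet).split(' '))
-- ===== Notes on version B (the rewrite author's own statement) =====
-- stated objective: faster
-- what changed: A repeatedly splices the string in place while scanning it (each deletion rebuilds the whole string); B makes one pass that splits on the space separator, truncates each token at its first escape-starting backslash not opening a backslash-n escape, and rejoins the tokens.
import Mathlib
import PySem

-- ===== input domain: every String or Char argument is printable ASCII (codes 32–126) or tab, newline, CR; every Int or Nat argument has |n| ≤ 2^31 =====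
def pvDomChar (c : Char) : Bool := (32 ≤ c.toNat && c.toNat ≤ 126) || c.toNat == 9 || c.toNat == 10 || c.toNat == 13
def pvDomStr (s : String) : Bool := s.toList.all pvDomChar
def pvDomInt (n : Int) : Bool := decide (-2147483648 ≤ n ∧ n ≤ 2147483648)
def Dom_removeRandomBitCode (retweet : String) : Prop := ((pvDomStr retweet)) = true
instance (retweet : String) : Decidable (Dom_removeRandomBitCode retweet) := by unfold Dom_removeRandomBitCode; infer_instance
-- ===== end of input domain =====

-- B replaces A's splice-while-scanning loop by split-on-space / truncate-each-token / rejoin (same return value).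

-- ===== PORT A =====
-- inner loop: 'for j in range(i, len(tweet)): if tweet[j] == " ": top = j; break'  (top initialised to 0)
def pvInner (t : List Char) : List Int → Int
  | [] => 0
  | j :: js => if PySem.List.pyGet? t j = some ' ' then j else pvInner t js

-- the splice 'tweet = tweet[0:bottom] + tweet[top:len(tweet)]' with top computed by the inner loop
def pvSplice (t : List Char) (i : Nat) : List Char :=
  let top0 := pvInner t (PySem.List.pyRange (i : Int) (t.length : Int) 1)
  let top := if top0 = 0 then (t.length : Int) else top0
  PySem.List.slice t (some (0 : Int)) (some (i : Int)) ++
    PySem.List.slice t (some top) (some (t.length : Int))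

-- outer loop 'for i in range(len(tweet))' over the in-place-spliced tweet; fuel = the range's length, fixed at entry
def pvLoopA : Nat -> Nat -> List Char -> List Char
  | 0, _, t => t
  | fuel + 1, i, t =>
    if t.length <= i then t
    else if PySem.List.pyGet? t (i : Int) = some '\\' then
      if PySem.List.slice t (some (i : Int)) (some ((i : Int) + 2)) ≠ ['\\', 'n'] then
        pvLoopA fuel (i + 1) (pvSplice t i)
      else pvLoopA fuel (i + 1) t
    else pvLoopA fuel (i + 1) t

def removeRandomBitCode (retweet : String) : String :=
  String.mk (pvLoopA retweet.toList.length 0 retweet.toList)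

-- ===== PORT B =====
-- Source B's cut: scan the token; at the first '\' with t[k+1:k+2] != 'n' return the prefix scanned so far
def pvCut : List Char → List Char
  | [] => []
  | c :: cs => if c = '\\' ∧ cs.take 1 ≠ ['n'] then [] else c :: pvCut cs

def removeRandomBitCode_alt (retweet : String) : String :=
  String.mk (PySem.Chars.join [' '] ((PySem.Chars.splitOn retweet.toList [' ']).map pvCut))

-- ===== PRECONDITION & SPEC =====
def Spec_removeRandomBitCode (retweet : String) (out : String) : Prop := out = removeRandomBitCode_alt retweet
instance (retweet : String) (out : String) : Decidable (Spec_removeRandomBitCode retweet out) := by unfold Spec_removeRandomBitCode; infer_instance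

-- ===== CLAIM (what is proved, stated in full; the proofs are below) =====
def Claim_equal_removeRandomBitCode : Prop := ∀ (retweet : String), Dom_removeRandomBitCode retweet → Spec_removeRandomBitCode retweet (removeRandomBitCode retweet)

-- ===== LEMMAS AND PROOFS =====

-- B's split(' ') rebuilt as a simple accumulator recursion
def pvSplit (pre : List Char) : List Char → List (List Char)
  | [] => [pre]
  | c :: r => if c = ' ' then pre :: pvSplit [] r else pvSplit (pre ++ [c]) r

-- common specification of both programs: one left-to-right pass over the characters
def pvProc : List Char → List Char
  | [] => []
  | c :: r =>
    if c = '\\' then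
      if r.take 1 = ['n'] then c :: pvProc r
      else
        match h : r.dropWhile (· ≠ ' ') with
        | [] => []
        | _ :: r' => ' ' :: pvProc r'
    else c :: pvProc r
termination_by l => l.length
decreasing_by
  · simp
  · have h1 : (r.dropWhile (· ≠ ' ')).length ≤ r.length := r.length_dropWhile_le _
    rw [h] at h1
    simp at h1 ⊢
    omega
  · simp

theorem pvGo_eq (fuel : Nat) : ∀ (l cur : List Char) (acc2 : List (List Char)),
    l.length ≤ fuel →
    PySem.Chars.splitOn.go [' '] fuel l cur acc2 = acc2.reverse ++ pvSplit cur.reverse l := by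
  induction fuel with
  | zero =>
    intro l cur acc2 h
    have : l = [] := by simpa using h
    subst this
    simp [PySem.Chars.splitOn.go, pvSplit]
  | succ fuel ih =>
    intro l cur acc2 h
    cases l with
    | nil => simp [PySem.Chars.splitOn.go, pvSplit]
    | cons c rest =>
      rw [PySem.Chars.splitOn.go]
      by_cases hc : c = ' '
      · subst hc
        simp only [List.length_cons] at *
        rw [if_pos (by simp)]
        rw [ih _ _ _ (by simpa using h)]
        simp [pvSplit]
      · rw [if_neg (by simp only [List.isPrefixOf]; simp [Ne.symm hc])]
        rw [ih _ _ _ (by simp at h ⊢; omega)]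
        simp [pvSplit, hc]

theorem pvSplitOn_eq (l : List Char) : PySem.Chars.splitOn l [' '] = pvSplit [] l := by
  rw [PySem.Chars.splitOn, pvGo_eq _ _ _ _ (by omega)]
  simp

theorem pvSplit_pre (l : List Char) : ∀ pre, pvSplit pre l = (pvSplit [] l).modifyHead (pre ++ ·) := by
  induction l with
  | nil => intro pre; simp [pvSplit]
  | cons c r ih =>
    intro pre
    by_cases hc : c = ' '
    · subst hc; simp [pvSplit]
    · simp only [pvSplit, if_neg hc]
      simp only [List.nil_append]
      rw [ih (pre ++ [c]), ih [c]]
      cases pvSplit [] r with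
      | nil => simp
      | cons h tl => simp

theorem pvSplit_ne_nil (pre : List Char) (l : List Char) : pvSplit pre l ≠ [] := by
  induction l generalizing pre with
  | nil => simp [pvSplit]
  | cons c r ih => by_cases hc : c = ' ' <;> simp [pvSplit, hc, ih]

theorem pvSplit_struct (l : List Char) :
    pvSplit [] l = l.takeWhile (· ≠ ' ') ::
      (match l.dropWhile (· ≠ ' ') with | [] => [] | _ :: r' => pvSplit [] r') := by
  induction l with
  | nil => simp [pvSplit]
  | cons c r ih =>
    by_cases hc : c = ' '
    · subst hc; simp [pvSplit, List.takeWhile_cons, List.dropWhile_cons]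
    · simp only [pvSplit, if_neg hc, List.takeWhile_cons, List.dropWhile_cons]
      rw [show ([] ++ [c] : List Char) = [c] by simp, pvSplit_pre r [c], ih]
      simp [hc]

theorem pvJoin_head_cons (s : List Char) (a : Char) (x : List Char) (xs : List (List Char)) :
    PySem.Chars.join s ((a :: x) :: xs) = a :: PySem.Chars.join s (x :: xs) := by
  cases xs with
  | nil => simp [PySem.Chars.join, List.intercalate]
  | cons y ys => simp [PySem.Chars.join, List.intercalate]

theorem pvDropWhile_head (l xs : List Char) (x : Char)
    (h : l.dropWhile (· ≠ ' ') = x :: xs) : x = ' ' := by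
  induction l with
  | nil => simp at h
  | cons c r ih =>
    rw [List.dropWhile_cons] at h
    by_cases hc : c = ' '
    · subst hc; simp at h; exact h.1.symm
    · rw [if_pos (by simp [hc])] at h; exact ih h

theorem pvTakeWhile_take_one (l : List Char) (p : Char → Bool) (h : l.takeWhile p ≠ []) :
    (l.takeWhile p).take 1 = l.take 1 := by
  cases l with
  | nil => simp at h
  | cons c r =>
    rw [List.takeWhile_cons] at h ⊢
    by_cases hp : p c
    · simp [hp]
    · simp [hp] at h

theorem pvDropWhile_drop (l : List Char) (p : Char → Bool) :
    l.dropWhile p = l.drop (l.takeWhile p).length := by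
  induction l with
  | nil => simp
  | cons c r ih =>
    by_cases hp : p c
    · simp [List.dropWhile_cons, List.takeWhile_cons, hp, ih]
    · simp [List.dropWhile_cons, List.takeWhile_cons, hp]

theorem pvJoin_nil_cons (y : List Char) (ys : List (List Char)) :
    PySem.Chars.join [' '] ([] :: y :: ys) = ' ' :: PySem.Chars.join [' '] (y :: ys) := by
  simp [PySem.Chars.join, List.intercalate]

theorem pvCut_bs (h : List Char) (hh : h.take 1 ≠ ['n']) : pvCut ('\\' :: h) = [] := by
  simp [pvCut, hh]

theorem pvTake_one_takeWhile (r : List Char) (hn : r.take 1 ≠ ['n']) :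
    (r.takeWhile (· ≠ ' ')).take 1 ≠ ['n'] := by
  by_cases he : r.takeWhile (· ≠ ' ') = []
  · rw [he]; simp
  · rw [pvTakeWhile_take_one r _ he]; exact hn

theorem pvLHS_cons (c : Char) (r : List Char) (hc : c ≠ ' ')
    (hcut : pvCut (c :: r.takeWhile (· ≠ ' ')) = c :: pvCut (r.takeWhile (· ≠ ' '))) :
    PySem.Chars.join [' '] ((pvSplit [] (c :: r)).map pvCut) =
      c :: PySem.Chars.join [' '] ((pvSplit [] r).map pvCut) := by
  have h1 : pvSplit [] (c :: r) = (pvSplit [] r).modifyHead (fun x => [c] ++ x) := by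
    simp only [pvSplit, if_neg hc, List.nil_append]
    exact pvSplit_pre r [c]
  rw [h1, pvSplit_struct r]
  simp only [List.modifyHead, List.map_cons, List.cons_append, List.nil_append]
  rw [hcut, pvJoin_head_cons]

theorem pvB_eq_proc (l : List Char) :
    PySem.Chars.join [' '] ((pvSplit [] l).map pvCut) = pvProc l := by
  induction l using pvProc.induct with
  | case1 => simp [pvSplit, pvCut, pvProc, PySem.Chars.join, List.intercalate]
  | case2 r hn ih =>
    have hcut : pvCut ('\\' :: r.takeWhile (· ≠ ' ')) = '\\' :: pvCut (r.takeWhile (· ≠ ' ')) := by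
      obtain ⟨r2, hr⟩ : ∃ r2, r = 'n' :: r2 := by
        cases r with
        | nil => simp at hn
        | cons a b => simp [List.take] at hn; exact ⟨b, by rw [hn]⟩
      subst hr
      simp [pvCut, List.takeWhile_cons]
    rw [pvLHS_cons _ _ (by decide) hcut, ih]
    simp [pvProc, hn]
  | case3 r hn hdrop =>
    have h1 : pvSplit [] ('\\' :: r) = ['\\' :: r.takeWhile (· ≠ ' ')] := by
      rw [pvSplit_struct ('\\' :: r)]
      simp only [List.takeWhile_cons, List.dropWhile_cons]
      rw [if_pos (by decide), if_pos (by decide), hdrop]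
    rw [h1]
    simp only [List.map_cons, List.map_nil]
    rw [pvCut_bs _ (pvTake_one_takeWhile r hn)]
    have hdrop2 : List.dropWhile (fun x => decide ¬x = ' ') r = [] := hdrop
    rw [pvProc]
    simp [PySem.Chars.join, List.intercalate, hn]
    split
    · rfl
    · next _ _ heq => rw [hdrop2] at heq; cases heq
  | case4 r hn x r2 hdrop ih =>
    have h1 : pvSplit [] ('\\' :: r) = ('\\' :: r.takeWhile (· ≠ ' ')) :: pvSplit [] r2 := by
      rw [pvSplit_struct ('\\' :: r)]
      simp only [List.takeWhile_cons, List.dropWhile_cons]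
      rw [if_pos (by decide), if_pos (by decide), hdrop]
    rw [h1]
    simp only [List.map_cons]
    rw [pvCut_bs _ (pvTake_one_takeWhile r hn)]
    obtain ⟨y, ys, hy⟩ : ∃ y ys, pvSplit [] r2 = y :: ys := by
      cases hz : pvSplit [] r2 with
      | nil => exact absurd hz (pvSplit_ne_nil _ _)
      | cons y ys => exact ⟨y, ys, rfl⟩
    rw [hy]
    simp only [List.map_cons]
    rw [pvJoin_nil_cons, ← List.map_cons, ← hy, ih]
    have hdrop2 : List.dropWhile (fun x => decide ¬x = ' ') r = x :: r2 := hdrop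
    rw [pvProc]
    simp [hn]
    split
    · next heq => rw [hdrop2] at heq; cases heq
    · next _ _ heq =>
        rw [hdrop2] at heq
        injection heq with h1 h2
        rw [h2]
  | case5 c r hc ih =>
    by_cases hsp : c = ' '
    · subst hsp
      have h1 : pvSplit [] (' ' :: r) = [] :: pvSplit [] r := by simp [pvSplit]
      obtain ⟨y, ys, hy⟩ : ∃ y ys, pvSplit [] r = y :: ys := by
        cases hz : pvSplit [] r with
        | nil => exact absurd hz (pvSplit_ne_nil _ _)
        | cons y ys => exact ⟨y, ys, rfl⟩
      rw [h1, hy]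
      simp only [List.map_cons, show pvCut [] = [] from rfl]
      rw [pvJoin_nil_cons, ← List.map_cons, ← hy, ih]
      simp [pvProc, hc]
    · have hcut : pvCut (c :: r.takeWhile (· ≠ ' ')) = c :: pvCut (r.takeWhile (· ≠ ' ')) := by
        simp [pvCut, hc]
      rw [pvLHS_cons _ _ hsp hcut, ih]
      simp [pvProc, hc]

theorem pvInner_eq (t : List Char) : ∀ (n a : Nat), t.length - a = n →
    pvInner t (PySem.List.pyRange (a : Int) (t.length : Int) 1) =
      (if a + ((t.drop a).takeWhile (· ≠ ' ')).length < t.length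
       then ((a + ((t.drop a).takeWhile (· ≠ ' ')).length : Nat) : Int) else 0) := by
  intro n
  induction n with
  | zero =>
    intro a h
    have ha : t.length ≤ a := by omega
    have h1 : PySem.List.pyRange (a : Int) (t.length : Int) 1 = [] := by
      rw [PySem.List.pyRange_one]
      have : ((t.length : Int) - a).toNat = 0 := by omega
      simp [this]
    rw [h1]
    rw [List.drop_eq_nil_of_le ha]
    simp [pvInner]
    omega
  | succ n ih =>
    intro a h
    have ha : a < t.length := by omega
    rw [PySem.List.pyRange_one_cons (by exact_mod_cast ha)]
    rw [pvInner]
    rw [PySem.List.pyGet?_natCast, List.getElem?_eq_getElem ha]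
    have hdropa : t.drop a = t[a] :: t.drop (a + 1) := List.drop_eq_getElem_cons ha
    by_cases hsp : t[a] = ' '
    · rw [if_pos (by rw [hsp])]
      rw [hdropa, hsp]
      rw [List.takeWhile_cons]
      simp [ha]
    · rw [if_neg (by simp [hsp])]
      have hcast : ((a : Int) + 1) = ((a + 1 : Nat) : Int) := by push_cast; ring
      rw [hcast, ih (a + 1) (by omega)]
      have htw : List.takeWhile (fun x => decide (x ≠ ' ')) (t[a] :: t.drop (a + 1)) =
          t[a] :: List.takeWhile (fun x => decide (x ≠ ' ')) (t.drop (a + 1)) := by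
        rw [List.takeWhile_cons, if_pos (by simp [hsp])]
      rw [hdropa, htw]
      simp only [List.length_cons]
      split_ifs with h1 h2 h3
      · congr 1; omega
      · exfalso; omega
      · exfalso; omega
      · rfl

theorem pvSplice_found (t : List Char) (i : Nat) (hlen : i < t.length)
    (hsp : i + ((t.drop i).takeWhile (· ≠ ' ')).length < t.length)
    (hm1 : 1 ≤ ((t.drop i).takeWhile (· ≠ ' ')).length) :
    pvSplice t i = t.take i ++ t.drop (i + ((t.drop i).takeWhile (· ≠ ' ')).length) := by
  have hinner := pvInner_eq t (t.length - i) i rfl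
  rw [if_pos hsp] at hinner
  set m := ((t.drop i).takeWhile (· ≠ ' ')).length with hm
  have hne0 : ((i + m : Nat) : Int) ≠ 0 := by
    have : i + m ≠ 0 := by omega
    exact_mod_cast this
  rw [pvSplice, hinner]
  simp only [if_neg hne0]
  have h0 : PySem.List.slice t (some (0 : Int)) (some (i : Int)) = t.take i := by
    have h0' : ((0 : Int)) = ((0 : Nat) : Int) := rfl
    rw [h0', PySem.List.slice_natCast]
    simp
  have h1 : PySem.List.slice t (some ((i + m : Nat) : Int)) (some (t.length : Int)) =
      t.drop (i + m) := by
    have hl : (t.length : Int) = ((t.length : Nat) : Int) := rfl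
    rw [hl, PySem.List.slice_natCast]
    exact List.take_of_length_le (by simp)
  rw [h0, h1]

theorem pvSplice_notfound (t : List Char) (i : Nat) (hlen : i < t.length)
    (hsp : ¬ (i + ((t.drop i).takeWhile (· ≠ ' ')).length < t.length)) :
    pvSplice t i = t.take i := by
  have hinner := pvInner_eq t (t.length - i) i rfl
  rw [if_neg hsp] at hinner
  have hif : (if (0 : Int) = 0 then ((t.length : Int)) else (0 : Int)) = (t.length : Int) :=
    if_pos rfl
  rw [pvSplice, hinner, hif]
  have h0 : PySem.List.slice t (some (0 : Int)) (some (i : Int)) = t.take i := by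
    have h0' : ((0 : Int)) = ((0 : Nat) : Int) := rfl
    rw [h0', PySem.List.slice_natCast]
    simp
  have h1 : PySem.List.slice t (some (t.length : Int)) (some (t.length : Int)) = [] := by
    have hl : (t.length : Int) = ((t.length : Nat) : Int) := rfl
    rw [hl, PySem.List.slice_natCast]
    simp
  rw [h0, h1, List.append_nil]

theorem pvLoopA_eq (fuel : Nat) : ∀ (i : Nat) (t : List Char), t.length ≤ i + fuel →
    pvLoopA fuel i t = t.take i ++ pvProc (t.drop i) := by
  induction fuel with
  | zero =>
    intro i t h
    rw [pvLoopA, List.take_of_length_le (by omega), List.drop_eq_nil_of_le (by omega)]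
    simp [pvProc]
  | succ fuel ih =>
    intro i t h
    rw [pvLoopA]
    by_cases hlen : t.length ≤ i
    · rw [if_pos hlen, List.take_of_length_le hlen, List.drop_eq_nil_of_le hlen]
      simp [pvProc]
    · rw [if_neg hlen]
      push_neg at hlen
      have hget : PySem.List.pyGet? t (i : Int) = some t[i] := by
        rw [PySem.List.pyGet?_natCast, List.getElem?_eq_getElem hlen]
      have hdropi : t.drop i = t[i] :: t.drop (i + 1) := List.drop_eq_getElem_cons hlen
      have htake : t.take (i + 1) = t.take i ++ [t[i]] := by
        rw [List.take_add_one, List.getElem?_eq_getElem hlen]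
        rfl
      by_cases hbs : t[i] = '\\'
      · rw [if_pos (by rw [hget, hbs])]
        have hslice : PySem.List.slice t (some (i : Int)) (some ((i : Int) + 2)) =
            '\\' :: (t.drop (i + 1)).take 1 := by
          have h2 : ((i : Int) + 2) = ((i : Int) + ((2 : Nat) : Int)) := by push_cast; ring
          rw [h2, PySem.List.slice_natCast_add, hdropi, hbs]
          rfl
        by_cases hn : (t.drop (i + 1)).take 1 = ['n']
        · -- '\n' at the run start: the splice is skipped
          rw [if_neg (by rw [hslice, hn]; simp)]
          rw [ih (i + 1) t (by omega), htake, hdropi, pvProc]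
          rw [if_pos hbs, if_pos hn]
          simp [hbs]
        · -- the run from i to the next space is deleted
          rw [if_pos (by rw [hslice]; intro hcon; apply hn; injection hcon)]
          have hm1 : 1 ≤ ((t.drop i).takeWhile (· ≠ ' ')).length := by
            rw [hdropi, List.takeWhile_cons, if_pos (by rw [hbs]; decide)]
            simp
          have hmle : ((t.drop i).takeWhile (· ≠ ' ')).length ≤ t.length - i := by
            have h3 := (List.takeWhile_prefix (l := t.drop i) (p := (· ≠ ' '))).length_le
            simp only [List.length_drop] at h3
            omega
          have hdw : (t.drop i).dropWhile (· ≠ ' ') =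
              t.drop (i + ((t.drop i).takeWhile (· ≠ ' ')).length) := by
            rw [pvDropWhile_drop, List.drop_drop]
          have hdwtail : (t.drop (i + 1)).dropWhile (· ≠ ' ') =
              t.drop (i + ((t.drop i).takeWhile (· ≠ ' ')).length) := by
            rw [← hdw, hdropi, List.dropWhile_cons, if_pos (by rw [hbs]; decide)]
          by_cases hsp : i + ((t.drop i).takeWhile (· ≠ ' ')).length < t.length
          · rw [pvSplice_found t i hlen hsp hm1]
            obtain ⟨x, r', hx⟩ : ∃ x r',
                t.drop (i + ((t.drop i).takeWhile (· ≠ ' ')).length) = x :: r' := by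
              cases hz : t.drop (i + ((t.drop i).takeWhile (· ≠ ' ')).length) with
              | nil =>
                exfalso
                have h4 := congrArg List.length hz
                simp only [List.length_drop, List.length_nil] at h4
                omega
              | cons x r' => exact ⟨x, r', rfl⟩
            have hxsp : x = ' ' := pvDropWhile_head _ _ _ (by rw [hdw, hx])
            have hr'len := congrArg List.length hx
            simp only [List.length_drop, List.length_cons] at hr'len
            rw [hx]
            have hti : (t.take i).length = i := by rw [List.length_take]; omega
            rw [ih (i + 1) _ (by
              rw [List.length_append, hti, List.length_cons]
              omega)]
            rw [List.take_append, List.drop_append]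
            rw [List.take_of_length_le (by rw [hti]; omega),
              List.drop_eq_nil_of_le (by rw [hti]; omega), hti]
            have hone : i + 1 - i = 1 := by omega
            rw [hone]
            simp only [List.take_succ_cons, List.take_zero, List.drop_succ_cons,
              List.drop_zero, List.nil_append]
            rw [hdropi, pvProc, if_pos hbs, if_neg hn]
            have hmatch : (t.drop (i + 1)).dropWhile (fun c => decide ¬c = ' ') =
                x :: r' := by rw [← hx, ← hdwtail]
            split
            · next heq => rw [hmatch] at heq; cases heq
            · next _ _ heq =>
              rw [hmatch] at heq
              injection heq with e1 e2
              rw [hxsp, e2]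
              simp
          · rw [pvSplice_notfound t i hlen hsp]
            rw [ih (i + 1) _ (by rw [List.length_take]; omega)]
            rw [List.take_of_length_le (by rw [List.length_take]; omega),
              List.drop_eq_nil_of_le (by rw [List.length_take]; omega)]
            have hnil : pvProc [] = [] := by simp [pvProc]
            rw [hnil, hdropi, pvProc, if_pos hbs, if_neg hn]
            have hmatch : (t.drop (i + 1)).dropWhile (fun c => decide ¬c = ' ') = [] := by
              rw [hdwtail]
              exact List.drop_eq_nil_of_le (by omega)
            split
            · simp [pvProc]
            · next _ _ heq => rw [hmatch] at heq; cases heq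
      · rw [if_neg (by rw [hget]; simp [hbs])]
        rw [ih (i + 1) t (by omega), hdropi, pvProc, if_neg hbs, htake,
          List.append_assoc, List.singleton_append]

-- ===== VERDICT (by name: the statement is the Claim_ definition above) =====
theorem removeRandomBitCode_spec : Claim_equal_removeRandomBitCode := by
  intro retweet _
  unfold Spec_removeRandomBitCode removeRandomBitCode removeRandomBitCode_alt
  rw [pvLoopA_eq retweet.toList.length 0 retweet.toList (by omega), pvSplitOn_eq,
    pvB_eq_proc]
  simp
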